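-- pv_equiv track=rewrite | github.com/OD1995/AdventOfCode2021 | Day17.py | steps_to_get_to_max_height
-- ===== SOURCE A (Python) =====
-- def steps_to_get_to_max_height(vy):
--     cy = 0
--     s = 0
--     while vy > 0:
--         cy += vy
--         vy -= 1
--         s += 1
--     return cy,s
-- ===== SOURCE B (Python) =====
-- def steps_to_get_to_max_height(vy):
--     if vy > 0:
--         return vy * (vy + 1) // 2, vy
--     return 0, 0
-- ===== Notes on version B (the rewrite author's own statement) =====
-- stated objective: faster
-- what changed: Replaced the O(vy) decrement loop with the closed-form Gauss sum vy*(vy+1)//2 and step count vy.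
import Mathlib
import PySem

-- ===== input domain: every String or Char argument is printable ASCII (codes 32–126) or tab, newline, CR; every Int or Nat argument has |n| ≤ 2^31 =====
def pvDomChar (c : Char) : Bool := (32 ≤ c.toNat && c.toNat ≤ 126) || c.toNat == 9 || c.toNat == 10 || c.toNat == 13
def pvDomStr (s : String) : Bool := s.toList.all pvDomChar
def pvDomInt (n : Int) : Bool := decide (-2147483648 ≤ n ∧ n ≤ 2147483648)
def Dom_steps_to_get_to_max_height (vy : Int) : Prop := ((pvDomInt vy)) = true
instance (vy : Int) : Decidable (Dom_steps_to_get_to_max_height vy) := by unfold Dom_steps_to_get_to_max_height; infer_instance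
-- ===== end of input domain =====

-- B replaces A's O(vy) decrement loop by the closed form (vy*(vy+1)//2, vy): faster (asymptotic).

-- ===== PORT A =====
-- the while loop of A, same state (cy, s, vy), same update order
def stepsLoopA (vy cy s : Int) : List Int :=
  if vy > 0 then stepsLoopA (vy - 1) (cy + vy) (s + 1) else [cy, s]
termination_by vy.toNat
decreasing_by omega

def steps_to_get_to_max_height (vy : Int) : List Int := stepsLoopA vy 0 0

-- ===== PORT B =====
def steps_to_get_to_max_height_alt (vy : Int) : List Int :=
  if vy > 0 then [PySem.Int.floordiv (vy * (vy + 1)) 2, vy] else [0, 0]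

-- ===== PRECONDITION & SPEC =====
def Spec_steps_to_get_to_max_height (vy : Int) (out : List Int) : Prop := out = steps_to_get_to_max_height_alt vy
instance (vy : Int) (out : List Int) : Decidable (Spec_steps_to_get_to_max_height vy out) := by unfold Spec_steps_to_get_to_max_height; infer_instance

-- ===== CLAIM (what is proved, stated in full; the proofs are below) =====
def Claim_equal_steps_to_get_to_max_height : Prop := ∀ (vy : Int), Dom_steps_to_get_to_max_height vy → Spec_steps_to_get_to_max_height vy (steps_to_get_to_max_height vy)

-- ===== LEMMAS AND PROOFS =====

-- triangular sum, recursively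
def pvGauss : Nat → Int
  | 0 => 0
  | n + 1 => ((n : Int) + 1) + pvGauss n

theorem two_mul_pvGauss (n : Nat) : 2 * pvGauss n = (n : Int) * (n + 1) := by
  induction n with
  | zero => simp [pvGauss]
  | succ n ih => simp [pvGauss]; ring_nf; ring_nf at ih; omega

theorem stepsLoopA_gauss (n : Nat) : ∀ cy s : Int,
    stepsLoopA (n : Int) cy s = [cy + pvGauss n, s + n] := by
  induction n with
  | zero => intro cy s; rw [stepsLoopA]; simp [pvGauss]
  | succ n ih =>
    intro cy s
    rw [stepsLoopA]
    have h : ((n : Int) + 1 > 0) := by positivity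
    simp only [Nat.cast_succ, h, if_pos]
    have : (n : Int) + 1 - 1 = (n : Int) := by ring
    rw [this, ih]
    simp [pvGauss]; constructor <;> ring

theorem stepsLoopA_nonpos (vy : Int) (h : ¬ vy > 0) (cy s : Int) :
    stepsLoopA vy cy s = [cy, s] := by
  rw [stepsLoopA]; simp [h]

-- ===== VERDICT (by name: the statement is the Claim_ definition above) =====
theorem steps_to_get_to_max_height_spec : Claim_equal_steps_to_get_to_max_height := by
  intro vy _
  unfold Spec_steps_to_get_to_max_height steps_to_get_to_max_height steps_to_get_to_max_height_alt
  by_cases h : vy > 0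
  · obtain ⟨n, rfl⟩ : ∃ n : Nat, vy = (n : Int) := ⟨vy.toNat, by omega⟩
    rw [stepsLoopA_gauss, if_pos h]
    have h2 : PySem.Int.floordiv ((n : Int) * ((n : Int) + 1)) 2 = pvGauss n := by
      rw [PySem.Int.floordiv_eq_ediv_of_pos (by norm_num), ← two_mul_pvGauss]
      omega
    rw [h2]
    ring_nf
  · rw [stepsLoopA_nonpos vy h, if_neg h]
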